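-- pv_equiv track=rewrite | github.com/Itzskade/Python_Piscine | Module03/ex3/ft_achievement_tracker.py | compute_rare_achievements
-- ===== SOURCE A (Python) =====
-- from typing import Dict, Set
--
-- def compute_rare_achievements(player_achievements: Dict[str, Set[str]], achievements: Set[str]) -> Set[str]:
--     names = list(player_achievements)
--     repeated = set()
--     for i in range(len(names)):
--         for j in range (i + 1, len(names)):
--             repeated = repeated.union(player_achievements[names[i]].intersection(player_achievements[names[j]]))
--     rare = achievements.difference(repeated)
--     return rare
-- ===== SOURCE B (Python) =====
-- def compute_rare_achievements(player_achievements, achievements):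
--     count = {}
--     for achs in player_achievements.values():
--         for a in achs:
--             count[a] = count.get(a, 0) + 1
--     return {a for a in achievements if count.get(a, 0) < 2}
-- ===== Notes on version B (the rewrite author's own statement) =====
-- stated objective: faster
-- what changed: Replaces the pairwise player-vs-player intersection loop by a single pass that counts, per achievement, how many players hold it, then keeps the achievements with count < 2.
import Mathlib
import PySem

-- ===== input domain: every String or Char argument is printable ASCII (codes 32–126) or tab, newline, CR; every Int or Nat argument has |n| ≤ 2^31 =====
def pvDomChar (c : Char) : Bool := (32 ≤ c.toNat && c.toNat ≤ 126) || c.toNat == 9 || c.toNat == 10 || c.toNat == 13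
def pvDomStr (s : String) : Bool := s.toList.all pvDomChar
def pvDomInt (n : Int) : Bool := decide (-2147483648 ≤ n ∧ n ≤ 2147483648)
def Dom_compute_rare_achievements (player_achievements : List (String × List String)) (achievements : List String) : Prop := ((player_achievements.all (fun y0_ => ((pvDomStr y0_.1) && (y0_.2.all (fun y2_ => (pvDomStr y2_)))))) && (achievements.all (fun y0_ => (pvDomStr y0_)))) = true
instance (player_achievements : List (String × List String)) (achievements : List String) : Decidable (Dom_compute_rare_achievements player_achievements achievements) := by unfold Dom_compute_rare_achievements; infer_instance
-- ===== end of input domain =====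

-- B replaces A's pairwise player-vs-player intersection loop by one counting pass over the
-- players' sets followed by a single filter of `achievements` (objective: faster).

-- ===== PORT A =====
-- inner loop 'for j in range(i+1, len(names)): repeated = repeated.union(...)'
def pvInnerA (d : PySem.Dict String (List String)) (n : String) (rest : List String)
    (rep : PySem.Set String) : PySem.Set String :=
  rest.foldl (fun r m => PySem.Set.union r
    (PySem.Set.inter (PySem.Set.ofList (d.getD n [])) (PySem.Set.ofList (d.getD m [])))) rep

-- outer loop 'for i in range(len(names))', walking the suffixes of names
def pvPairsA (d : PySem.Dict String (List String)) : List String → PySem.Set String → PySem.Set String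
  | [], rep => rep
  | n :: rest, rep => pvPairsA d rest (pvInnerA d n rest rep)

def compute_rare_achievements (player_achievements : List (String × List String)) (achievements : List String) : List String :=
  let d := PySem.Dict.ofList player_achievements
  let names := d.keys
  let repeated := pvPairsA d names PySem.Set.empty
  PySem.Set.diff (PySem.Set.ofList achievements) repeated

-- ===== PORT B =====
def compute_rare_achievements_alt (player_achievements : List (String × List String)) (achievements : List String) : List String :=
  let d := PySem.Dict.ofList player_achievements
  let count := d.values.foldl
    (fun c achs => (PySem.Set.ofList achs).foldl (fun c a => c.insert a (c.getD a 0 + 1)) c)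
    (PySem.Dict.empty : PySem.Dict String Int)
  (PySem.Set.ofList achievements).filter (fun a => count.getD a 0 < 2)

-- ===== PRECONDITION & SPEC =====
def Spec_compute_rare_achievements (player_achievements : List (String × List String)) (achievements : List String) (out : List String) : Prop := out = compute_rare_achievements_alt player_achievements achievements
instance (player_achievements : List (String × List String)) (achievements : List String) (out : List String) : Decidable (Spec_compute_rare_achievements player_achievements achievements out) := by unfold Spec_compute_rare_achievements; infer_instance

-- ===== CLAIM (what is proved, stated in full; the proofs are below) =====
def Claim_equal_compute_rare_achievements : Prop := ∀ (player_achievements : List (String × List String)) (achievements : List String), Dom_compute_rare_achievements player_achievements achievements → Spec_compute_rare_achievements player_achievements achievements (compute_rare_achievements player_achievements achievements)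

-- ===== LEMMAS AND PROOFS =====

-- membership in A's inner fold
theorem mem_pvInnerA (d : PySem.Dict String (List String)) (n : String) (rest : List String)
    (rep : PySem.Set String) (a : String) :
    a ∈ pvInnerA d n rest rep ↔ a ∈ rep ∨ (a ∈ d.getD n [] ∧ ∃ m ∈ rest, a ∈ d.getD m []) := by
  induction rest generalizing rep with
  | nil => simp [pvInnerA]
  | cons m rest ih =>
      have h := ih (PySem.Set.union rep
        (PySem.Set.inter (PySem.Set.ofList (d.getD n [])) (PySem.Set.ofList (d.getD m []))))
      unfold pvInnerA at h ⊢
      rw [List.foldl_cons, h]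
      simp only [PySem.Set.mem_union, PySem.Set.mem_inter, PySem.Set.mem_ofList,
        List.mem_cons]
      constructor
      · rintro ((hr | ⟨h1, h2⟩) | ⟨h1, m', hm', h2⟩)
        · exact Or.inl hr
        · exact Or.inr ⟨h1, m, Or.inl rfl, h2⟩
        · exact Or.inr ⟨h1, m', Or.inr hm', h2⟩
      · rintro (hr | ⟨h1, m', (rfl | hm'), h2⟩)
        · exact Or.inl (Or.inl hr)
        · exact Or.inl (Or.inr ⟨h1, h2⟩)
        · exact Or.inr ⟨h1, m', hm', h2⟩

-- membership in A's pair loop = at least two players of the suffix hold a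
theorem mem_pvPairsA (d : PySem.Dict String (List String)) (names : List String)
    (rep : PySem.Set String) (a : String) :
    a ∈ pvPairsA d names rep ↔ a ∈ rep ∨ 2 ≤ names.countP (fun n => decide (a ∈ d.getD n [])) := by
  induction names generalizing rep with
  | nil => simp [pvPairsA]
  | cons n rest ih =>
      have hex : (∃ m ∈ rest, a ∈ d.getD m []) ↔ 0 < rest.countP (fun n => decide (a ∈ d.getD n [])) := by
        rw [List.countP_pos_iff]; simp
      rw [pvPairsA, ih, mem_pvInnerA, hex, List.countP_cons]
      by_cases h : a ∈ d.getD n [] <;> by_cases hr : a ∈ rep <;> simp [h, hr] <;>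
        exact fun hh => hex.2 (by omega)

-- B's counting dict: value at a = number of processed players whose set holds a
theorem getD_countFold (vs : List (List String)) (c : PySem.Dict String Int) (a : String) :
    (vs.foldl (fun c achs => (PySem.Set.ofList achs).foldl (fun c a => c.insert a (c.getD a 0 + 1)) c) c).getD a 0
      = c.getD a 0 + (vs.countP (fun v => decide (a ∈ v)) : Int) := by
  induction vs generalizing c with
  | nil => simp
  | cons v vs ih =>
      rw [List.foldl_cons, ih, PySem.Dict.getD_foldl_insert_add_one, List.countP_cons]
      have hc : List.count a (PySem.Set.ofList v) = if a ∈ v then 1 else 0 := by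
        by_cases h : a ∈ v
        · rw [if_pos h]
          exact List.count_eq_one_of_mem (PySem.Set.nodup_ofList v)
            (by simpa [PySem.Set.mem_ofList] using h)
        · rw [if_neg h, List.count_eq_zero]
          simpa [PySem.Set.mem_ofList] using h
      rw [hc]
      by_cases h : a ∈ v
      · simp only [h, if_pos, decide_true]
        push_cast; ring
      · simp [h]

-- ===== VERDICT (by name: the statement is the Claim_ definition above) =====
theorem compute_rare_achievements_spec : Claim_equal_compute_rare_achievements := by
  intro pa achievements _
  unfold Spec_compute_rare_achievements compute_rare_achievements compute_rare_achievements_alt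
  set d := PySem.Dict.ofList pa with hd
  have hvals : d.values = d.keys.map (fun k => d.getD k []) := by
    show d.items.map Prod.snd = _
    rw [PySem.Dict.items_eq_map_keys d (hd ▸ PySem.Dict.nodup_keys_ofList pa) ([] : List String),
      List.map_map]
    rfl
  have hdiff : PySem.Set.diff (PySem.Set.ofList achievements) (pvPairsA d d.keys PySem.Set.empty)
      = (PySem.Set.ofList achievements).filter
          (fun a => !((pvPairsA d d.keys PySem.Set.empty).contains a)) := rfl
  rw [hdiff]
  simp only [hvals]
  apply List.filter_congr
  intro a _
  rw [getD_countFold, List.countP_map]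
  simp only [Function.comp_def]
  have hmem := mem_pvPairsA d d.keys PySem.Set.empty a
  simp only [PySem.Set.empty, List.not_mem_nil, false_or] at hmem
  by_cases h2 : 2 ≤ d.keys.countP (fun n => decide (a ∈ d.getD n []))
  · have hmm : a ∈ pvPairsA d d.keys PySem.Set.empty := hmem.2 h2
    have hcb : (pvPairsA d d.keys PySem.Set.empty).contains a = true := by simpa using hmm
    rw [hcb, PySem.Dict.getD_empty]
    symm
    rw [Bool.not_true, decide_eq_false_iff_not]
    omega
  · have hmm : a ∉ pvPairsA d d.keys PySem.Set.empty := fun hx => h2 (hmem.1 hx)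
    have hcb : (pvPairsA d d.keys PySem.Set.empty).contains a = false := by simpa using hmm
    rw [hcb, PySem.Dict.getD_empty]
    symm
    rw [Bool.not_false, decide_eq_true_eq]
    omega
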